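-- pv_equiv track=rewrite | github.com/772vjrvj/pythoncrawling | kmong/ko/강남엄마/main.py | grade_to_str
-- ===== SOURCE A (Python) =====
-- def grade_to_str(grades):
--     grade_mapping = {
--         1: "미취학 0세",
--         2: "미취학 1세",
--         3: "미취학 2세",
--         4: "미취학 3세",
--         5: "미취학 4세",
--         6: "미취학 5세",
--         7: "미취학 6세",
--         8: "초등학교 1학년",
--         9: "초등학교 2학년",
--         10: "초등학교 3학년",
--         11: "초등학교 4학년",
--         12: "초등학교 5학년",
--         13: "초등학교 6학년",
--         14: "중학교 1학년",
--         15: "중학교 2학년",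
--         16: "중학교 3학년",
--         17: "고등학교 1학년",
--         18: "고등학교 2학년",
--         19: "고등학교 3학년",
--         20: "재수/N수"
--     }
--
--     if not grades:
--         return ""
--
--     grades.sort()
--     ranges = {"미취학": [], "초등학교": [], "중학교": [], "고등학교": [], "재수/N수": []}
--
--     for grade in grades:
--         if grade in range(1, 8):
--             ranges["미취학"].append(grade)
--         elif grade in range(8, 14):
--             ranges["초등학교"].append(grade)
--         elif grade in range(14, 17):
--             ranges["중학교"].append(grade)
--         elif grade in range(17, 20):
--             ranges["고등학교"].append(grade)
--         elif grade == 20: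
--             ranges["재수/N수"].append(grade)
--
--     result = []
--     for key in ranges:
--         if ranges[key]:
--             start = ranges[key][0]
--             end = ranges[key][-1]
--             if start == end:
--                 result.append(grade_mapping[start])
--             else:
--                 result.append(f"{grade_mapping[start]} ~ {grade_mapping[end]}")
--
--     return ", ".join(result)
-- ===== SOURCE B (Python) =====
-- GRADE_MAPPING = {
--     1: "미취학 0세", 2: "미취학 1세", 3: "미취학 2세", 4: "미취학 3세",
--     5: "미취학 4세", 6: "미취학 5세", 7: "미취학 6세",
--     8: "초등학교 1학년", 9: "초등학교 2학년", 10: "초등학교 3학년",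
--     11: "초등학교 4학년", 12: "초등학교 5학년", 13: "초등학교 6학년",
--     14: "중학교 1학년", 15: "중학교 2학년", 16: "중학교 3학년",
--     17: "고등학교 1학년", 18: "고등학교 2학년", 19: "고등학교 3학년",
--     20: "재수/N수",
-- }
--
--
-- def _category(g):
--     """Category index 0..4, or None for grades outside 1..20."""
--     if 1 <= g < 8:
--         return 0
--     if 8 <= g < 14:
--         return 1
--     if 14 <= g < 17:
--         return 2
--     if 17 <= g < 20:
--         return 3
--     if g == 20:
--         return 4
--     return None
--
--
-- def grade_to_str(grades):
--     # One unsorted pass: track (min, max) per category, no sort needed.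
--     bounds = {}
--     for g in grades:
--         c = _category(g)
--         if c is None:
--             continue
--         if c in bounds:
--             lo, hi = bounds[c]
--             bounds[c] = (min(lo, g), max(hi, g))
--         else:
--             bounds[c] = (g, g)
--     parts = []
--     for c in range(5):
--         if c in bounds:
--             lo, hi = bounds[c]
--             if lo == hi:
--                 parts.append(GRADE_MAPPING[lo])
--             else:
--                 parts.append(f"{GRADE_MAPPING[lo]} ~ {GRADE_MAPPING[hi]}")
--     return ", ".join(parts)
-- ===== Notes on version B (the rewrite author's own statement) =====
-- stated objective: faster
-- what changed: B replaces A's in-place sort + five dict-of-list buckets + second pass over the dict by a single unsorted pass keeping a running (min, max) per category, then formats the five categories directly; B does not mutate the argument list (A sorts it in place).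
import Mathlib
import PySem

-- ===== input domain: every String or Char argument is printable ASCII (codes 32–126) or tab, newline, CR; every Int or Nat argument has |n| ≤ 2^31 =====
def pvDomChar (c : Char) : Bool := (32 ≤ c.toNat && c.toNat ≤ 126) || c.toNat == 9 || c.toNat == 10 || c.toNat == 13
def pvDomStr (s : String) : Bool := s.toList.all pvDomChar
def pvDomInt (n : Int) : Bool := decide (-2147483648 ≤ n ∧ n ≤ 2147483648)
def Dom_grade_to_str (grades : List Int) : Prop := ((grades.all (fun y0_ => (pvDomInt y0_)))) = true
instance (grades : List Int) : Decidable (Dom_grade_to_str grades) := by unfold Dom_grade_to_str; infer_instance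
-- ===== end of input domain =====

-- B replaces A's sort + five dict buckets + second dict pass by a single unsorted pass keeping
-- (min, max) per category; return values agree everywhere, but B does not reproduce A's in-place
-- sort of the argument list (the equivalence proved here is about the return value only).

-- ===== PORT A =====
-- the literal grade→name table (A builds it locally; Source B has the same literal as GRADE_MAPPING)
def pvGradeMapping : PySem.Dict Int String :=
  PySem.Dict.ofList [(1, "미취학 0세"), (2, "미취학 1세"), (3, "미취학 2세"), (4, "미취학 3세"),
    (5, "미취학 4세"), (6, "미취학 5세"), (7, "미취학 6세"),
    (8, "초등학교 1학년"), (9, "초등학교 2학년"), (10, "초등학교 3학년"),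
    (11, "초등학교 4학년"), (12, "초등학교 5학년"), (13, "초등학교 6학년"),
    (14, "중학교 1학년"), (15, "중학교 2학년"), (16, "중학교 3학년"),
    (17, "고등학교 1학년"), (18, "고등학교 2학년"), (19, "고등학교 3학년"),
    (20, "재수/N수")]

-- loop body of A's first 'for grade in grades' loop (the if/elif chain appending into `ranges`)
def pvStepA (d : PySem.Dict String (List Int)) (grade : Int) : PySem.Dict String (List Int) :=
  if grade ∈ PySem.List.pyRange 1 8 then d.modify "미취학" [] (· ++ [grade])
  else if grade ∈ PySem.List.pyRange 8 14 then d.modify "초등학교" [] (· ++ [grade])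
  else if grade ∈ PySem.List.pyRange 14 17 then d.modify "중학교" [] (· ++ [grade])
  else if grade ∈ PySem.List.pyRange 17 20 then d.modify "고등학교" [] (· ++ [grade])
  else if grade = 20 then d.modify "재수/N수" [] (· ++ [grade])
  else d

-- loop body of A's second 'for key in ranges' loop
def pvEmitA (ranges : PySem.Dict String (List Int)) (result : List String) (key : String) : List String :=
  if ranges.getD key [] ≠ [] then
    -- start = ranges[key][0]; end = ranges[key][-1]; both in-range since the list is nonempty,
    -- and grade_mapping[...] never raises since buckets only hold grades 1..20, so getD is exact
    let start := PySem.List.pyGetD (ranges.getD key []) 0 0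
    let stop := PySem.List.pyGetD (ranges.getD key []) (-1) 0
    if start = stop then result ++ [pvGradeMapping.getD start ""]
    else result ++ [pvGradeMapping.getD start "" ++ " ~ " ++ pvGradeMapping.getD stop ""]
  else result

def grade_to_str (grades : List Int) : String :=
  if grades = [] then ""           -- `if not grades: return ""`
  else
    let sortedGrades := PySem.List.sorted grades (fun x => x) false    -- grades.sort()
    let ranges0 : PySem.Dict String (List Int) :=
      PySem.Dict.ofList [("미취학", []), ("초등학교", []), ("중학교", []), ("고등학교", []), ("재수/N수", [])]
    let ranges := sortedGrades.foldl pvStepA ranges0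
    let result := ranges.keys.foldl (pvEmitA ranges) []
    PySem.Str.join ", " result

-- ===== PORT B =====
-- Source B's _category helper: category index 0..4, None outside 1..20
def pvCategory (g : Int) : Option Int :=
  if 1 ≤ g ∧ g < 8 then some 0
  else if 8 ≤ g ∧ g < 14 then some 1
  else if 14 ≤ g ∧ g < 17 then some 2
  else if 17 ≤ g ∧ g < 20 then some 3
  else if g = 20 then some 4
  else none

-- loop body of Source B's single pass: fold (min, max) per category into `bounds`
def pvStepB (d : PySem.Dict Int (Int × Int)) (g : Int) : PySem.Dict Int (Int × Int) :=
  match pvCategory g with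
  | none => d
  | some c =>
    if d.contains c then
      let p := d.getD c (0, 0)       -- guarded by contains, so the default is never used
      d.insert c (min p.1 g, max p.2 g)
    else d.insert c (g, g)

-- loop body of Source B's 'for c in range(5)' output loop
def pvEmitB (bounds : PySem.Dict Int (Int × Int)) (parts : List String) (c : Int) : List String :=
  if bounds.contains c then
    let p := bounds.getD c (0, 0)  -- guarded by contains; GRADE_MAPPING lookups are exact as in A
    if p.1 = p.2 then parts ++ [pvGradeMapping.getD p.1 ""]
    else parts ++ [pvGradeMapping.getD p.1 "" ++ " ~ " ++ pvGradeMapping.getD p.2 ""]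
  else parts

def grade_to_str_alt (grades : List Int) : String :=
  let bounds := grades.foldl pvStepB PySem.Dict.empty
  let parts := (PySem.List.pyRange 0 5).foldl (pvEmitB bounds) []
  PySem.Str.join ", " parts

-- ===== PRECONDITION & SPEC =====
def Spec_grade_to_str (grades : List Int) (out : String) : Prop := out = grade_to_str_alt grades
instance (grades : List Int) (out : String) : Decidable (Spec_grade_to_str grades out) := by unfold Spec_grade_to_str; infer_instance

-- ===== CLAIM (what is proved, stated in full; the proofs are below) =====
def Claim_equal_grade_to_str : Prop := ∀ (grades : List Int), Dom_grade_to_str grades → Spec_grade_to_str grades (grade_to_str grades)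

-- ===== LEMMAS AND PROOFS =====

def pvKeyName (c : Int) : String :=
  if c = 0 then "미취학" else if c = 1 then "초등학교" else if c = 2 then "중학교"
  else if c = 3 then "고등학교" else "재수/N수"

def pvMM (o : Option (Int × Int)) (g : Int) : Option (Int × Int) :=
  match o with
  | none => some (g, g)
  | some p => some (min p.1 g, max p.2 g)

lemma pvStepA_eq (d : PySem.Dict String (List Int)) (g : Int) :
    pvStepA d g = match pvCategory g with
      | some c => d.modify (pvKeyName c) [] (· ++ [g])
      | none => d := by
  unfold pvStepA pvCategory
  simp only [PySem.List.mem_pyRange_one]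
  split_ifs <;> rfl

lemma foldA_getD (l : List Int) (d : PySem.Dict String (List Int)) (key : String) :
    (l.foldl pvStepA d).getD key [] =
      d.getD key [] ++ l.filter (fun g => (pvCategory g).map pvKeyName == some key) := by
  induction l generalizing d with
  | nil => simp
  | cons g t ih =>
    simp only [List.foldl_cons, pvStepA_eq, List.filter_cons]
    cases hc : pvCategory g with
    | none => simp [ih]
    | some c =>
      simp only [Option.map_some]
      rw [ih, PySem.Dict.getD_modify]
      by_cases hk : key = pvKeyName c
      · simp [hk]
      · simp [hk, show ¬pvKeyName c = key from fun h => hk h.symm]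

lemma foldA_keys (l : List Int) (d : PySem.Dict String (List Int))
    (hcont : ∀ c : Int, d.contains (pvKeyName c) = true) :
    (l.foldl pvStepA d).keys = d.keys := by
  induction l generalizing d with
  | nil => rfl
  | cons g t ih =>
    simp only [List.foldl_cons, pvStepA_eq]
    cases hc : pvCategory g with
    | none => exact ih d hcont
    | some c =>
      rw [ih _ (fun c' => by rw [PySem.Dict.contains_modify]; simp [hcont c'])]
      rw [PySem.Dict.keys_modify, PySem.Dict.keys_insert_of_contains _ _ (hcont c)]

lemma foldB_get? (l : List Int) (d : PySem.Dict Int (Int × Int)) (c : Int) :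
    (l.foldl pvStepB d).get? c =
      (l.filter (fun g => pvCategory g == some c)).foldl pvMM (d.get? c) := by
  induction l generalizing d with
  | nil => rfl
  | cons g t ih =>
    simp only [List.foldl_cons, List.filter_cons]
    rw [ih]
    cases hc : pvCategory g with
    | none => simp [pvStepB, hc]
    | some k =>
      by_cases hkc : k = c
      · subst hkc
        simp only [beq_self_eq_true, if_true]
        simp only [List.foldl_cons]
        congr 1
        by_cases hcon : d.contains k
        · obtain ⟨p, hp⟩ : ∃ p, d.get? k = some p := by
            rw [PySem.Dict.contains_eq_isSome_get?] at hcon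
            exact Option.isSome_iff_exists.mp hcon
          simp [pvStepB, hc, hcon, PySem.Dict.getD_of_get?_eq_some _ _ hp,
            PySem.Dict.get?_insert_self, hp, pvMM]
        · have hn : d.get? k = none := by
            rw [PySem.Dict.contains_eq_isSome_get?] at hcon
            simpa using hcon
          simp [pvStepB, hc, hcon, PySem.Dict.get?_insert_self, hn, pvMM]
      · rw [show ((some k == some c) = false) by simp [hkc], if_neg (by simp)]
        congr 1
        cases hcon : d.contains k <;>
          simp [pvStepB, hc, hcon, PySem.Dict.get?_insert_of_ne _ _ (show c ≠ k from fun h => hkc h.symm)]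

lemma foldMM_some (l : List Int) (a b : Int) :
    l.foldl pvMM (some (a, b)) = some (l.foldl min a, l.foldl max b) := by
  induction l generalizing a b with
  | nil => rfl
  | cons g t ih => simp [pvMM, ih]

lemma foldMM_cons (h : Int) (r : List Int) :
    (h :: r).foldl pvMM none = some (r.foldl min h, r.foldl max h) := by
  simp [pvMM, foldMM_some]

lemma foldl_min_head (r : List Int) (h : Int) (hp : (h :: r).Pairwise (· ≤ ·)) :
    r.foldl min h = h := by
  induction r generalizing h with
  | nil => rfl
  | cons x r' ih =>
    have h1 : h ≤ x := (List.pairwise_cons.mp hp).1 x (by simp)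
    have h2 : (h :: r').Pairwise (· ≤ ·) := by
      have := List.Pairwise.sublist (l₁ := h :: r') (by simp) hp
      exact this
    simp only [List.foldl_cons, min_eq_left h1]
    exact ih h h2

lemma foldl_max_last (r : List Int) (h : Int) (hp : (h :: r).Pairwise (· ≤ ·)) :
    r.foldl max h = (h :: r).getLast (List.cons_ne_nil h r) := by
  induction r generalizing h with
  | nil => rfl
  | cons x r' ih =>
    have h1 : h ≤ x := (List.pairwise_cons.mp hp).1 x (by simp)
    simp only [List.foldl_cons, max_eq_right h1]
    rw [ih x (List.pairwise_cons.mp hp).2]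
    simp [List.getLast_cons]

lemma foldl_min_perm (h₁ : Int) (r₁ : List Int) (h₂ : Int) (r₂ : List Int)
    (hp : (h₁ :: r₁).Perm (h₂ :: r₂)) : r₁.foldl min h₁ = r₂.foldl min h₂ := by
  have m1 := PySem.List.foldl_min_le r₁ h₁
  have m2 := PySem.List.foldl_min_le r₂ h₂
  have e1 : r₁.foldl min h₁ ∈ h₂ :: r₂ := by
    rw [← hp.mem_iff]
    rcases PySem.List.foldl_min_mem r₁ h₁ with h | h
    · rw [h]; simp
    · exact List.mem_cons_of_mem _ h
  have e2 : r₂.foldl min h₂ ∈ h₁ :: r₁ := by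
    rw [hp.mem_iff]
    rcases PySem.List.foldl_min_mem r₂ h₂ with h | h
    · rw [h]; simp
    · exact List.mem_cons_of_mem _ h
  apply le_antisymm
  · rcases List.mem_cons.mp e2 with h | h
    · rw [h]; exact m1.1
    · exact m1.2 _ h
  · rcases List.mem_cons.mp e1 with h | h
    · rw [h]; exact m2.1
    · exact m2.2 _ h

lemma foldl_max_perm (h₁ : Int) (r₁ : List Int) (h₂ : Int) (r₂ : List Int)
    (hp : (h₁ :: r₁).Perm (h₂ :: r₂)) : r₁.foldl max h₁ = r₂.foldl max h₂ := by
  have m1 := PySem.List.le_foldl_max r₁ h₁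
  have m2 := PySem.List.le_foldl_max r₂ h₂
  have e1 : r₁.foldl max h₁ ∈ h₂ :: r₂ := by
    rw [← hp.mem_iff]
    rcases PySem.List.foldl_max_mem r₁ h₁ with h | h
    · rw [h]; simp
    · exact List.mem_cons_of_mem _ h
  have e2 : r₂.foldl max h₂ ∈ h₁ :: r₁ := by
    rw [hp.mem_iff]
    rcases PySem.List.foldl_max_mem r₂ h₂ with h | h
    · rw [h]; simp
    · exact List.mem_cons_of_mem _ h
  apply le_antisymm
  · rcases List.mem_cons.mp e1 with h | h
    · rw [h]; exact m2.1
    · exact m2.2 _ h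
  · rcases List.mem_cons.mp e2 with h | h
    · rw [h]; exact m1.1
    · exact m1.2 _ h

def pvFmt (lo hi : Int) : String :=
  if lo = hi then pvGradeMapping.getD lo ""
  else pvGradeMapping.getD lo "" ++ " ~ " ++ pvGradeMapping.getD hi ""

def pvSegA (ranges : PySem.Dict String (List Int)) (key : String) : List String :=
  if ranges.getD key [] ≠ [] then
    [pvFmt (PySem.List.pyGetD (ranges.getD key []) 0 0) (PySem.List.pyGetD (ranges.getD key []) (-1) 0)]
  else []

def pvSegB (bounds : PySem.Dict Int (Int × Int)) (c : Int) : List String :=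
  if bounds.contains c then [pvFmt (bounds.getD c (0, 0)).1 (bounds.getD c (0, 0)).2] else []

lemma pyGetD_cons_zero (h : Int) (r : List Int) : PySem.List.pyGetD (h :: r) 0 0 = h := by
  norm_num [PySem.List.pyGetD, PySem.List.pyGet?, PySem.List.pyIdx?]

lemma pyGetD_neg_one (l : List Int) (hne : l ≠ []) :
    PySem.List.pyGetD l (-1) 0 = l.getLast hne := by
  have hl : 0 < l.length := List.length_pos_iff.mpr hne
  simp only [PySem.List.pyGetD, PySem.List.pyGet?, PySem.List.pyIdx?]
  rw [if_neg (by omega), if_pos (by omega)]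
  simp only [Option.bind_some]
  rw [List.getLast_eq_getElem, List.getElem?_eq_getElem (by omega)]
  simp

lemma seg_eq (grades : List Int) (c : Int) (key : String)
    (d0 : PySem.Dict String (List Int)) (hd0 : d0.getD key [] = [])
    (hpred : ∀ g, ((pvCategory g).map pvKeyName == some key) = (pvCategory g == some c)) :
    pvSegA ((PySem.List.sorted grades (fun x => x) false).foldl pvStepA d0) key
      = pvSegB (grades.foldl pvStepB PySem.Dict.empty) c := by
  have ht : ((PySem.List.sorted grades (fun x => x) false).foldl pvStepA d0).getD key []
      = (PySem.List.sorted grades (fun x => x) false).filter (fun g => pvCategory g == some c) := by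
    rw [foldA_getD, hd0, List.nil_append]
    exact List.filter_congr (fun g _ => hpred g)
  have ho : (grades.foldl pvStepB PySem.Dict.empty).get? c
      = (grades.filter (fun g => pvCategory g == some c)).foldl pvMM none := by
    rw [foldB_get?, PySem.Dict.get?_empty]
  have hperm : ((PySem.List.sorted grades (fun x => x) false).filter
        (fun g => pvCategory g == some c)).Perm
      (grades.filter (fun g => pvCategory g == some c)) :=
    (PySem.List.sorted_perm grades (fun x => x) false).filter _
  have hpair : ((PySem.List.sorted grades (fun x => x) false).filter
        (fun g => pvCategory g == some c)).Pairwise (· ≤ ·) :=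
    List.Pairwise.filter _ (PySem.List.sorted_pairwise grades (fun x => x))
  unfold pvSegA pvSegB
  rw [ht]
  cases hT : (PySem.List.sorted grades (fun x => x) false).filter
      (fun g => pvCategory g == some c) with
  | nil =>
    have hu : grades.filter (fun g => pvCategory g == some c) = [] := by
      rw [hT] at hperm; exact hperm.symm.eq_nil
    have : (grades.foldl pvStepB PySem.Dict.empty).contains c = false := by
      rw [PySem.Dict.contains_eq_isSome_get?, ho, hu]; rfl
    simp [this]
  | cons h r =>
    rw [hT] at hperm hpair
    have hune : grades.filter (fun g => pvCategory g == some c) ≠ [] := by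
      intro hnil; rw [hnil] at hperm; exact absurd hperm.eq_nil (by simp)
    obtain ⟨h', r', hu⟩ := List.exists_cons_of_ne_nil hune
    rw [hu] at hperm ho
    rw [foldMM_cons] at ho
    have hcon : (grades.foldl pvStepB PySem.Dict.empty).contains c = true := by
      rw [PySem.Dict.contains_eq_isSome_get?, ho]; rfl
    have hgd := PySem.Dict.getD_of_get?_eq_some (grades.foldl pvStepB PySem.Dict.empty) (0, 0) ho
    rw [if_pos (by simp), hcon, if_pos rfl, hgd]
    have hmin : h = r'.foldl min h' := by
      rw [← foldl_min_head r h hpair]; exact foldl_min_perm h r h' r' hperm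
    have hmax : (h :: r).getLast (List.cons_ne_nil h r) = r'.foldl max h' := by
      rw [← foldl_max_last r h hpair]; exact foldl_max_perm h r h' r' hperm
    rw [pyGetD_cons_zero, pyGetD_neg_one _ (List.cons_ne_nil h r), hmax, hmin]

lemma hpred0 : ∀ g, ((pvCategory g).map pvKeyName == some "미취학") = (pvCategory g == some 0) := by
  intro g; unfold pvCategory; split_ifs <;> rfl
lemma hpred1 : ∀ g, ((pvCategory g).map pvKeyName == some "초등학교") = (pvCategory g == some 1) := by
  intro g; unfold pvCategory; split_ifs <;> rfl
lemma hpred2 : ∀ g, ((pvCategory g).map pvKeyName == some "중학교") = (pvCategory g == some 2) := by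
  intro g; unfold pvCategory; split_ifs <;> rfl
lemma hpred3 : ∀ g, ((pvCategory g).map pvKeyName == some "고등학교") = (pvCategory g == some 3) := by
  intro g; unfold pvCategory; split_ifs <;> rfl
lemma hpred4 : ∀ g, ((pvCategory g).map pvKeyName == some "재수/N수") = (pvCategory g == some 4) := by
  intro g; unfold pvCategory; split_ifs <;> rfl

lemma grade_to_str_eq_alt (grades : List Int) : grade_to_str grades = grade_to_str_alt grades := by
  by_cases hnil : grades = []
  · subst hnil; rfl
  · unfold grade_to_str grade_to_str_alt
    rw [if_neg hnil]
    dsimp only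
    have hcont : ∀ c : Int, (PySem.Dict.ofList [("미취학", ([] : List Int)), ("초등학교", []), ("중학교", []), ("고등학교", []), ("재수/N수", [])]).contains (pvKeyName c) = true := by
      intro c; unfold pvKeyName; split_ifs <;> rfl
    rw [foldA_keys _ _ hcont]
    rw [show (PySem.Dict.ofList [("미취학", ([] : List Int)), ("초등학교", []), ("중학교", []), ("고등학교", []), ("재수/N수", [])]).keys = ["미취학", "초등학교", "중학교", "고등학교", "재수/N수"] from rfl]
    rw [show PySem.List.pyRange 0 5 = [0, 1, 2, 3, 4] from by decide]
    have hbA : ∀ (r : PySem.Dict String (List Int)) (acc : List String) (key : String),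
        pvEmitA r acc key = acc ++ pvSegA r key := by
      intro r acc key; simp only [pvEmitA, pvSegA, pvFmt]; split_ifs <;> simp
    have hbB : ∀ (b : PySem.Dict Int (Int × Int)) (acc : List String) (c : Int),
        pvEmitB b acc c = acc ++ pvSegB b c := by
      intro b acc c; simp only [pvEmitB, pvSegB, pvFmt]; split_ifs <;> simp
    have hA2 : ∀ (r : PySem.Dict String (List Int)) (keys : List String),
        keys.foldl (pvEmitA r) [] = keys.flatMap (pvSegA r) := by
      intro r keys
      rw [PySem.List.foldl_congr_mem keys (pvEmitA r) (fun acc x => acc ++ pvSegA r x) []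
        (fun acc x _ => hbA r acc x)]
      simpa using PySem.List.foldl_append_eq_flatMap (pvSegA r) keys []
    have hB2 : ∀ (b : PySem.Dict Int (Int × Int)) (cs : List Int),
        cs.foldl (pvEmitB b) [] = cs.flatMap (pvSegB b) := by
      intro b cs
      rw [PySem.List.foldl_congr_mem cs (pvEmitB b) (fun acc x => acc ++ pvSegB b x) []
        (fun acc x _ => hbB b acc x)]
      simpa using PySem.List.foldl_append_eq_flatMap (pvSegB b) cs []
    rw [hA2, hB2]
    simp only [List.flatMap_cons, List.flatMap_nil, List.append_nil]
    rw [seg_eq grades 0 "미취학" _ rfl hpred0, seg_eq grades 1 "초등학교" _ rfl hpred1,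
      seg_eq grades 2 "중학교" _ rfl hpred2, seg_eq grades 3 "고등학교" _ rfl hpred3,
      seg_eq grades 4 "재수/N수" _ rfl hpred4]

-- ===== VERDICT (by name: the statement is the Claim_ definition above) =====
theorem grade_to_str_spec : Claim_equal_grade_to_str := by
  intro grades _
  unfold Spec_grade_to_str
  exact grade_to_str_eq_alt grades
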